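-- pv_equiv track=rewrite | github.com/JingMog/RFL-MSD | RFL/chemfig_parser.py | process_virtual_bond
-- ===== SOURCE A (Python) =====
-- def process_virtual_bond(inArr): # used only for old rec format
--     outArr = []
--     ind = 0
--     while ind < len(inArr):
--         cur_ch = inArr[ind]
--         if cur_ch == "-":
--             if ind < len(inArr) -1 and inArr[ind+1] == "-":
--                 outArr.append("-:")
--                 ind += 2
--                 continue
--         outArr.append(cur_ch)
--         ind += 1
--     return "".join(outArr)
-- ===== SOURCE B (Python) =====
-- from itertools import groupby
--
-- def process_virtual_bond(inArr): # run-length version via groupby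
--     parts = []
--     for ch, grp in groupby(inArr):
--         n = sum(1 for _ in grp)
--         if ch == "-":
--             parts.append("-:" * (n // 2) + "-" * (n % 2))
--         else:
--             parts.append(ch * n)
--     return "".join(parts)
-- ===== Notes on version B (the rewrite author's own statement) =====
-- stated objective: alternative
-- what changed: B groups maximal runs of equal characters with itertools.groupby and emits each dash run's output from its length by arithmetic (L//2 pair markers then the leftover dash if L is odd), instead of A's index-based left-to-right scan with a two-step skip.
import Mathlib
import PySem

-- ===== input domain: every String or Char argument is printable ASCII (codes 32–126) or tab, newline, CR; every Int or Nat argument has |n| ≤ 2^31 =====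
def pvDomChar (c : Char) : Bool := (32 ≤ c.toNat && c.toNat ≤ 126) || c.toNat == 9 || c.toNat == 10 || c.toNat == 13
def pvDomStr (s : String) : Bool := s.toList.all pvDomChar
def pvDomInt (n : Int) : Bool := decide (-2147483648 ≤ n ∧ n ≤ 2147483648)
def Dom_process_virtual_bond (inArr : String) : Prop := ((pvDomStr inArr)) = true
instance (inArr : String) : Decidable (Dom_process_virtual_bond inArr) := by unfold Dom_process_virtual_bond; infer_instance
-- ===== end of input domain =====

-- B replaces A's per-index scan-with-skip by a groupby over maximal runs plus run-length arithmetic (alternative decomposition, same cost).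

-- ===== PORT A =====
-- A's while loop over indices, transliterated as structural recursion on the character
-- list: look at the current char and, for a dash, at the next one; skip two on "--".
def pvAStep : List Char → List Char
  | [] => []
  | c :: rest =>
    if c = '-' then
      -- lookahead 'ind < len-1 and inArr[ind+1] == "-"' as rest.head?; skip two = recurse on rest.tail
      if rest.head? = some '-' then '-' :: ':' :: pvAStep rest.tail
      else c :: pvAStep rest
    else c :: pvAStep rest
termination_by l => l.length
decreasing_by all_goals simp only [List.length_tail, List.length_cons]; omega

def process_virtual_bond (inArr : String) : String := String.ofList (pvAStep inArr.toList)

-- ===== PORT B =====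
-- length of the leading run of char c (groupby's run splitting)
def pvCountLead (c : Char) : List Char → Nat
  | [] => 0
  | d :: t => if d = c then pvCountLead c t + 1 else 0

-- what B emits for a run of char c of length n
def pvRender (c : Char) (n : Nat) : List Char :=
  if c = '-' then (List.replicate (n / 2) ['-', ':']).flatten ++ List.replicate (n % 2) '-'
  else List.replicate n c

def pvBGo : List Char → List Char
  | [] => []
  | c :: rest =>
    let k := pvCountLead c rest
    pvRender c (k + 1) ++ pvBGo (rest.drop k)
termination_by l => l.length
decreasing_by
  simp only [List.length_drop, List.length_cons]
  omega

def process_virtual_bond_alt (inArr : String) : String := String.ofList (pvBGo inArr.toList)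

-- ===== PRECONDITION & SPEC =====
def Spec_process_virtual_bond (inArr : String) (out : String) : Prop := out = process_virtual_bond_alt inArr
instance (inArr : String) (out : String) : Decidable (Spec_process_virtual_bond inArr out) := by unfold Spec_process_virtual_bond; infer_instance

-- ===== CLAIM (what is proved, stated in full; the proofs are below) =====
def Claim_equal_process_virtual_bond : Prop := ∀ (inArr : String), Dom_process_virtual_bond inArr → Spec_process_virtual_bond inArr (process_virtual_bond inArr)

-- ===== LEMMAS AND PROOFS =====

-- the leading run: take is a replicate, and the first char after it differs
theorem pvCountLead_take (c : Char) : ∀ (l : List Char),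
    l.take (pvCountLead c l) = List.replicate (pvCountLead c l) c := by
  intro l
  induction l with
  | nil => simp [pvCountLead]
  | cons d t ih =>
    by_cases h : d = c
    · simp [pvCountLead, h, List.replicate_succ, ih]
    · simp [pvCountLead, h]

theorem pvCountLead_drop (c : Char) : ∀ (l : List Char) (d : Char),
    (l.drop (pvCountLead c l)).head? = some d → d ≠ c := by
  intro l
  induction l with
  | nil => intro d h; simp [pvCountLead] at h
  | cons e t ih =>
    intro d h
    by_cases he : e = c
    · have h1 : pvCountLead c (e :: t) = pvCountLead c t + 1 := by
        simp [pvCountLead, he]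
      rw [h1, List.drop_succ_cons] at h
      exact ih d h
    · have h1 : pvCountLead c (e :: t) = 0 := by simp [pvCountLead, he]
      rw [h1, List.drop_zero, List.head?_cons, Option.some_inj] at h
      exact h ▸ he

theorem take_append_drop_eq (l : List Char) (k : Nat) :
    l = l.take k ++ l.drop k := (List.take_append_drop k l).symm

-- A copies a run of non-dash characters unchanged
theorem pvAStep_nondash (c : Char) (hc : c ≠ '-') :
    ∀ (n : Nat) (t : List Char),
      pvAStep (List.replicate n c ++ t) = List.replicate n c ++ pvAStep t := by
  intro n
  induction n with
  | zero => simp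
  | succ m ih =>
    intro t
    simp only [List.replicate_succ, List.cons_append]
    rw [pvAStep.eq_def]
    simp only [if_neg hc, ih]

-- A on a maximal dash run followed by a non-dash remainder
theorem pvAStep_dash : ∀ (n : Nat) (t : List Char),
    (∀ d, t.head? = some d → d ≠ '-') →
    pvAStep (List.replicate n '-' ++ t)
      = (List.replicate (n / 2) ['-', ':']).flatten
        ++ List.replicate (n % 2) '-' ++ pvAStep t := by
  intro n
  induction n using Nat.strong_induction_on with
  | _ n ih =>
    intro t ht
    match n with
    | 0 => simp
    | 1 =>
      simp only [List.replicate_succ, List.replicate_zero, List.nil_append, List.cons_append]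
      rw [pvAStep.eq_def]
      have hne : t.head? ≠ some '-' := by
        intro h
        exact ht '-' h rfl
      simp [hne]
    | (m + 2) =>
      simp only [List.replicate_succ, List.cons_append]
      rw [pvAStep.eq_def]
      have := ih m (by omega) t ht
      have h2 : (m + 2) / 2 = m / 2 + 1 := by omega
      have h3 : (m + 2) % 2 = m % 2 := by omega
      simp [this, h2, h3, List.replicate_succ]

theorem pvAStep_eq_pvBGo_aux : ∀ (n : Nat) (l : List Char), l.length ≤ n → pvAStep l = pvBGo l := by
  intro n
  induction n with
  | zero =>
    intro l hl
    have : l = [] := List.eq_nil_of_length_eq_zero (Nat.le_zero.mp hl)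
    subst this; simp [pvAStep, pvBGo]
  | succ n ih =>
    intro l hl
    match l with
    | [] => simp [pvAStep, pvBGo]
    | c :: rest =>
      rw [pvBGo]
      set k := pvCountLead c rest with hk
      have hsplit : rest = List.replicate k c ++ rest.drop k := by
        conv_lhs => rw [take_append_drop_eq rest k]
        rw [hk, pvCountLead_take]
      have hrec : pvAStep (rest.drop k) = pvBGo (rest.drop k) := by
        apply ih
        have : (rest.drop k).length ≤ rest.length := by simp
        simp only [List.length_cons] at hl
        omega
      by_cases hc : c = '-'
      · subst hc
        have hhead : ∀ d, ((rest.drop k).head?) = some d → d ≠ '-' := by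
          intro d hd; exact pvCountLead_drop '-' rest d (hk ▸ hd)
        have : pvAStep ('-' :: rest)
            = pvAStep (List.replicate (k + 1) '-' ++ rest.drop k) := by
          rw [List.replicate_succ, List.cons_append, ← hsplit]
        rw [this, pvAStep_dash (k + 1) (rest.drop k) hhead, hrec]
        simp [pvRender, List.append_assoc]
      · have : pvAStep (c :: rest)
            = pvAStep (List.replicate (k + 1) c ++ rest.drop k) := by
          rw [List.replicate_succ, List.cons_append, ← hsplit]
        rw [this, pvAStep_nondash c hc (k + 1) (rest.drop k), hrec]
        simp [pvRender, hc]

-- ===== VERDICT (by name: the statement is the Claim_ definition above) =====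
theorem process_virtual_bond_spec : Claim_equal_process_virtual_bond := by
  intro inArr _
  unfold Spec_process_virtual_bond process_virtual_bond process_virtual_bond_alt
  rw [pvAStep_eq_pvBGo_aux inArr.toList.length inArr.toList (le_refl _)]
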